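/-
  jsmn_d.bin: `jsmn_parse`, the check after the main loop (1004F9H – 100523H, 12 instructions, one loop, head 100509H):
  `if (tokens != NULL) for (i = toknext - 1; i >= 0; i--) if (tokens[i] is open) return JSMN_ERROR_PART;` = `Jsmn.finish` (with `scanOpen`).
-/
import Prog.Jsmn.D.ScanLemmas

namespace X86
namespace J6
namespace D
open X86.User (CodeAt RegsKept Span FlagsOK Layout toNat_add_ofNat toNat_ofNat_lt' add_ofNat_add)
open Jsmn JsmnDBytes

set_option maxRecDepth 100000
set_option maxHeartbeats 4000000
set_option linter.unusedSimpArgs false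
set_option linter.unusedVariables false

/-- The invariant at the head of the scan (100509H): `edx = j - 1`, no open token at `j` or above. -/
structure FinInv (c : PCtx) (n : User.Layout) (v0 : User.State) (s : St) (ts : Tokens) (j : Nat) (v : User.State) : Prop where
  rip : v.rip = 0x100509
  core : FrameCore c n v0 v s.p s.toks
  r15 : v.reg .r15 = UInt64.ofNat (u32 s.count)
  rdx : v.reg .rdx = UInt64.ofNat (u32 ((j : Int) - 1))
  jle : j ≤ c.numTokens
  scan : scanOpen ts (i32 ((s.p.toknext : Int) - 1) + 1).toNat = scanOpen ts j

theorem fin_body {n : User.Layout} {c : PCtx} {v0 v : User.State} {s : St} {ts : Tokens} (hts : s.toks = some ts)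
    (hinv : Inv Config.default s.p s.toks c.numTokens) (j : Nat) (hi : FinInv c n v0 s ts j v) :
    Reach n v (fun v' => AtRet c n v0 v' (finish s) s ∨ ∃ j', j' < j ∧ FinInv c n v0 s ts j' v') := by
  obtain ⟨p, toks, count⟩ := s
  dsimp only at hts hinv hi
  subst hts
  have hfc := hi.core
  have hW := hfc.entry.pre.toksW
  v3_open hi hW
  v3_open hi_core_entry_pre_call hi_core_entry_pre_env
  j6_bin
  obtain ⟨htb, hlen, htoks⟩ := hi_core_toksArg
  have hR := hfc.entry.pre.env.toksR.resolve_left htb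
  v3_open hR
  j6_bin
  have htl : toksBytes Config.default c.numTokens c.toks0 = 16 * c.numTokens := by
    cases h0 : c.toks0 with
    | none => exact absurd (hi_core_null.mpr h0) (by simp)
    | some _ => rfl
  simp only [PCtx.tlen, htl, dataWins] at *
  have hcode : CodeAt v.mem 0x10027a jsmn_parse_bytes := JsmnD.tjd_jsmn_parse_code (by v3_frame hi_core_entry_pre_call_img)
  have htinv := hinv.toks ts rfl
  have hsmall := htinv.small
  have htn := htinv.toknext
  have hi32 := i32_pred (k := p.toknext) (by omega)
  rcases j with _ | j
  · -- nothing left to look at: return count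
    rw [u32_pred_zero] at hi_rdx
    v3_walk hcode hfc.entry.pre.call.fetch [] until [0x100529]
    have hfin : finish ⟨p, some ts, count⟩ = count := by
      simp only [finish]; split
      · rfl
      · rw [hi_scan]; rfl
    refine Reach.done (Or.inl ⟨by simp, hfc.of_mem_eq (by simp) (by simp) (by simp) (by simp) (by simp) (by simp), ?_⟩)
    rw [hfin]; v3_regnorm; rw [hi_r15]
    have := u32_lt count
    v3_omega
  · have hj32 : j < 2147483648 := by omega
    rw [u32_pred_succ j (by omega)] at hi_rdx
    have ht := htoks.getD j (by omega)
    have haddr : tokAddr Config.default c.tb j = UInt64.ofNat (16 * j) + c.tb := by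
      unfold tokAddr; rw [tokSize_default]; exact UInt64.add_comm _ _
    rw [haddr] at ht
    obtain ⟨hrs, -, -⟩ := ht.start
    obtain ⟨hre, -, -⟩ := ht.«end»
    have hopen := isOpen_raw ht.start ht.«end»
    rw [hrs, hre] at hopen
    have hu1 := u32_lt (ts.getD j default).start
    have hu2 := u32_lt (ts.getD j default).«end»
    have hsx : Word.sext (UInt64.ofNat j) 32 = UInt64.ofNat j := by word_omega
    have hsh := shl4_ofNat j (by omega)
    have hpred : u32 ((j : Int) - 1) = (j + 4294967295) % 4294967296 := by unfold u32; omega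
    v3_walk hcode hfc.entry.pre.call.fetch [hsx, hsh] until [0x100529, 0x100509]
    · -- start == -1: not open, go on down
      have hno : ¬ (ts.getD j default).isOpen = true := by rw [hopen]; intro h; apply h.1; v3_omega
      refine Reach.done (Or.inr ⟨j, by omega, by simp, hfc.of_mem_eq (by simp) (by simp) (by simp) (by simp) (by simp) (by simp), by v3_regnorm; exact hi_r15,
        ?_, by omega, by rw [hi_scan, scanOpen_succ_closed hno]⟩)
      v3_regnorm; rw [hpred]; v3_omega
    · -- end != -1: not open, go on down
      have hno : ¬ (ts.getD j default).isOpen = true := by rw [hopen]; intro h; apply hbr_100521; rw [h.2]; rfl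
      refine Reach.done (Or.inr ⟨j, by omega, by simp, hfc.of_mem_eq (by simp) (by simp) (by simp) (by simp) (by simp) (by simp), by v3_regnorm; exact hi_r15,
        ?_, by omega, by rw [hi_scan, scanOpen_succ_closed hno]⟩)
      v3_regnorm; rw [hpred]; v3_omega
    · -- an open token: JSMN_ERROR_PART
      have hyes : (ts.getD j default).isOpen = true := by rw [hopen]; constructor <;> v3_omega
      have hfin : finish ⟨p, some ts, count⟩ = JSMN_ERROR_PART := by
        have hsc : scanOpen ts (i32 ((p.toknext : Int) - 1) + 1).toNat = some j := by rw [hi_scan, scanOpen_succ_open hyes]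
        simp only [finish]; split
        · exfalso
          have h0 : p.toknext = 0 := by omega
          rw [h0] at hsc
          exact absurd hsc (by simp [scanOpen, i32])
        · rw [hsc]
      refine Reach.done (Or.inl ⟨by simp, hfc.of_mem_eq (by simp) (by simp) (by simp) (by simp) (by simp) (by simp), ?_⟩)
      rw [hfin]; v3_regnorm; rfl

/-- **1004F9H → 100529H: the check after the main loop computes `Jsmn.finish`.** -/
theorem final_reach {n : User.Layout} {c : PCtx} {v0 v : User.State} {s : St} (h : AtFinal c n v0 v s) :
    Reach n v (fun v' => AtRet c n v0 v' (finish s) s) := by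
  obtain ⟨hrip, hf⟩ := h
  obtain ⟨p, toks, count⟩ := s
  have hfc := hf.core
  have hinv := hf.inv
  have hW := hfc.entry.pre.toksW
  v3_open hf hW
  v3_open hf_core_entry_pre_call hf_core_entry_pre_env
  j6_bin
  simp only [PCtx.tlen, dataWins] at *
  have hcode : CodeAt v.mem 0x10027a jsmn_parse_bytes := JsmnD.tjd_jsmn_parse_code (by v3_frame hf_core_entry_pre_call_img)
  cases toks with
  | none =>
    -- counting mode: return count
    have htb : c.tb = 0 := hf_core_toksArg
    v3_walk hcode hfc.entry.pre.call.fetch [] until [0x100529]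
    refine Reach.done ⟨by simp, hfc.of_mem_eq (by simp) (by simp) (by simp) (by simp) (by simp) (by simp), ?_⟩
    simp only [finish]; v3_regnorm; rw [hf_r15]
    have := u32_lt count
    v3_omega
  | some ts =>
    obtain ⟨htb, hlen, htoks⟩ := hf_core_toksArg
    have hR := hfc.entry.pre.env.toksR.resolve_left htb
    v3_open hR
    j6_bin
    have htinv := hinv.toks ts rfl
    have hsmall := htinv.small
    have htn := htinv.toknext
    v3_walk hcode hfc.entry.pre.call.fetch [] until [0x100509]
    refine Reach.loopOn (Inv := FinInv c n v0 ⟨p, some ts, count⟩ ts) (fun k v hi => fin_body rfl hinv k hi) p.toknext _ ?_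
    have hi32 := i32_pred (k := p.toknext) (by omega)
    refine ⟨by simp, hfc.of_mem_eq (by simp) (by simp) (by simp) (by simp) (by simp) (by simp), by v3_regnorm; exact hf_r15, ?_, htn, ?_⟩
    · v3_regnorm
      have : u32 ((p.toknext : Int) - 1) = (p.toknext + 4294967295) % 4294967296 := by unfold u32; omega
      rw [this]; v3_omega
    · dsimp only
      have e : ((p.toknext : Int) - 1 + 1).toNat = p.toknext := by omega
      rw [hi32, e]

/-- The check after the main loop, as the region statement of Prog/Jsmn/D/ParseInv.lean. -/
theorem final_spec (n : User.Layout) : FinalSpec n := fun _ _ _ _ h => final_reach h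

end D
end J6
end X86
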